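-- pv_equiv track=rewrite | github.com/mosobhy/Problem-Solving | count_good_numbers.py | getTheGoodNumbersCount
-- ===== SOURCE A (Python) =====
-- def getTheGoodNumbersCount(n, k, nums):
--     ''' a good number is the number that contain all the digits for 0 to k '''
--
--     counter = 0
--
--     for num in nums:
--         range_list = list(range(k+1))
--         for digit in num:
--             if int(digit) in range_list:
--                 range_list.remove(int(digit))
--             else:
--                 continue
--         if len(range_list) ==  0:
--             counter += 1
--
--     return counter
-- ===== SOURCE B (Python) =====
-- def getTheGoodNumbersCount(n, k, nums):
--     ''' a good number is the number that contain all the digits for 0 to k '''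
--     required = set(range(k + 1))
--     counter = 0
--     for num in nums:
--         seen = {int(ch) for ch in num}
--         if required <= seen:
--             counter += 1
--     return counter
-- ===== Notes on version B (the rewrite author's own statement) =====
-- stated objective: idiomatic
-- what changed: Replaces A's per-num copy of list(range(k+1)) with consume-by-list.remove (a linear scan per removal) by one hoisted required set and a per-num gather-digits-into-set pass followed by a subset test.
import Mathlib
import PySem

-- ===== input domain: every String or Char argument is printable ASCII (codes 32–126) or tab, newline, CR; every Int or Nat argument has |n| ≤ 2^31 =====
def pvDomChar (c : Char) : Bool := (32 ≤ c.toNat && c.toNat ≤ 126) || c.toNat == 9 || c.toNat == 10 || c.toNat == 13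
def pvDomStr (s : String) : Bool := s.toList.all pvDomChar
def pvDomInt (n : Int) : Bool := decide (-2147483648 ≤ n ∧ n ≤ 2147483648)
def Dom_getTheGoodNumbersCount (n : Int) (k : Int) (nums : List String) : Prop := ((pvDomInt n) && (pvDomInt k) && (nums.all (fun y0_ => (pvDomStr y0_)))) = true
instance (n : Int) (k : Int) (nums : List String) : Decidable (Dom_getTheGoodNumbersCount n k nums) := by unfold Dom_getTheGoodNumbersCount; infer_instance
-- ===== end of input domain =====

-- B hoists one required digit set and tests subset of the digits seen per string, instead of
-- A's per-string consume-and-remove from a fresh list(range(k+1)); idiomatic, same results.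


-- ===== PORT A =====
-- int(ch) for a one-character string; both Pythons apply int() per character.
def pyIntChar (c : Char) : Int := (PySem.Int.ofStr? (String.mk [c])).getD 0
  -- .getD 0: int(ch) raises ValueError on a non-digit character; Pre_ excludes those inputs.

-- the inner 'for digit in num: if int(digit) in range_list: range_list.remove(int(digit))'
def goA (cs : List Char) (rl : List Int) : List Int :=
  match cs with
  | [] => rl
  | c :: rest =>
      if rl.contains (pyIntChar c) then
        goA rest ((PySem.List.remove? rl (pyIntChar c)).getD rl)
      else
        goA rest rl

def getTheGoodNumbersCount (n : Int) (k : Int) (nums : List String) : Int :=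
  nums.foldl (fun counter num =>
    let range_list := goA num.toList (PySem.List.pyRange 0 (k + 1) 1)
    if range_list.length == 0 then counter + 1 else counter) 0

-- ===== PORT B =====
def getTheGoodNumbersCount_alt (n : Int) (k : Int) (nums : List String) : Int :=
  let required : PySem.Set Int := PySem.Set.ofList (PySem.List.pyRange 0 (k + 1) 1)
  nums.foldl (fun counter num =>
    let seen : PySem.Set Int := PySem.Set.ofList (num.toList.map pyIntChar)
    if PySem.Set.issubset required seen then counter + 1 else counter) 0

-- ===== PRECONDITION & SPEC =====
-- Pre_ excludes exactly the inputs on which Python A raises ValueError: int(digit) on a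
-- character that is not an ASCII decimal digit.
def Pre_getTheGoodNumbersCount (n : Int) (k : Int) (nums : List String) : Prop :=
  nums.all (fun s => s.toList.all Char.isDigit) = true
instance (n : Int) (k : Int) (nums : List String) : Decidable (Pre_getTheGoodNumbersCount n k nums) := by unfold Pre_getTheGoodNumbersCount; infer_instance

def pvWitness_getTheGoodNumbersCount : Int × Int × List String := (3, 2, ["012", "021", "13"])

def Spec_getTheGoodNumbersCount (n : Int) (k : Int) (nums : List String) (out : Int) : Prop := out = getTheGoodNumbersCount_alt n k nums
instance (n : Int) (k : Int) (nums : List String) (out : Int) : Decidable (Spec_getTheGoodNumbersCount n k nums out) := by unfold Spec_getTheGoodNumbersCount; infer_instance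

-- ===== CLAIM (what is proved, stated in full; the proofs are below) =====
def Claim_equal_getTheGoodNumbersCount : Prop := ∀ (n : Int) (k : Int) (nums : List String), Dom_getTheGoodNumbersCount n k nums → Pre_getTheGoodNumbersCount n k nums → Spec_getTheGoodNumbersCount n k nums (getTheGoodNumbersCount n k nums)

-- ===== LEMMAS AND PROOFS =====

theorem boolEq {a b : Bool} (h : a = true ↔ b = true) : a = b := by
  cases a <;> cases b <;> simp_all

-- A's consume loop on a duplicate-free list keeps exactly the values never seen among the digits.
theorem goA_eq_filter (cs : List Char) (rl : List Int) (h : rl.Nodup) :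
    goA cs rl = rl.filter (fun d => !((cs.map pyIntChar).contains d)) := by
  induction cs generalizing rl with
  | nil => simp [goA]
  | cons c rest ih =>
    by_cases hm : pyIntChar c ∈ rl
    · have hrem := PySem.List.remove?_eq_some_erase rl (pyIntChar c) hm
      have herase := List.Nodup.erase_eq_filter (a := pyIntChar c) h
      simp only [goA, List.elem_eq_contains, List.contains_iff_mem, hm, if_true, hrem,
        Option.getD_some]
      rw [ih _ (h.erase _), herase, List.filter_filter]
      apply List.filter_congr
      intro x _
      by_cases hxc : x = pyIntChar c
      · simp [hxc]
      · simp [List.contains_cons, hxc, Ne.symm hxc, Bool.and_comm]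
    · simp only [goA, List.elem_eq_contains, List.contains_iff_mem, hm, if_false]
      rw [ih _ h]
      apply List.filter_congr
      intro x hx
      have : x ≠ pyIntChar c := fun he => hm (he ▸ hx)
      simp [List.contains_eq_mem, this]

theorem per_num (k : Int) (cs : List Char) :
    ((goA cs (PySem.List.pyRange 0 (k + 1) 1)).length == 0)
      = PySem.Set.issubset (PySem.Set.ofList (PySem.List.pyRange 0 (k + 1) 1))
          (PySem.Set.ofList (cs.map pyIntChar)) := by
  rw [goA_eq_filter _ _ (PySem.List.nodup_pyRange_one 0 (k + 1))]
  apply boolEq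
  rw [PySem.Set.issubset_iff]
  simp only [beq_iff_eq, List.length_eq_zero_iff, List.filter_eq_nil_iff,
    PySem.Set.mem_ofList, Bool.not_eq_true', List.contains_eq_mem, decide_eq_false_iff_not,
    not_not]

-- ===== VERDICT (by name: the statement is the Claim_ definition above) =====
theorem getTheGoodNumbersCount_spec : Claim_equal_getTheGoodNumbersCount := by
  intro n k nums _ _
  unfold Spec_getTheGoodNumbersCount getTheGoodNumbersCount getTheGoodNumbersCount_alt
  have hfun : (fun (counter : Int) (num : String) =>
      if (goA num.toList (PySem.List.pyRange 0 (k + 1) 1)).length == 0 then counter + 1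
      else counter)
      = (fun (counter : Int) (num : String) =>
      if PySem.Set.issubset (PySem.Set.ofList (PySem.List.pyRange 0 (k + 1) 1))
          (PySem.Set.ofList (num.toList.map pyIntChar)) then counter + 1 else counter) := by
    funext counter num
    rw [per_num]
  simp only [hfun]
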